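-- pv_equiv track=rewrite | github.com/osiris-dnalang/osiris-cli | osiris/hardware/quera_adapter.py | correlated_merge_rounds
-- ===== SOURCE A (Python) =====
-- from typing import Any, Dict, List, Optional, Tuple
--
-- def correlated_merge_rounds(
--                             syndromes: List[Tuple[int, ...]]) -> Tuple[int, ...]:
--     if not syndromes:
--         return ()
--     n = len(syndromes[0])
--     merged = [0] * n
--     for s in syndromes:
--         for i in range(n):
--             merged[i] += s[i]
--     threshold = len(syndromes) // 2 + 1
--     return tuple(1 if m >= threshold else 0 for m in merged)
-- ===== SOURCE B (Python) =====
-- def correlated_merge_rounds(syndromes):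
--     if not syndromes:
--         return ()
--     n = len(syndromes[0])
--
--     def colsums(lo, hi):
--         # column sums of rows lo..hi-1, by divide and conquer
--         if hi - lo <= 1:
--             row = syndromes[lo]
--             return [row[i] for i in range(n)]
--         mid = (lo + hi) // 2
--         return [a + b for a, b in zip(colsums(lo, mid), colsums(mid, hi))]
--
--     sums = colsums(0, len(syndromes))
--     threshold = len(syndromes) // 2 + 1
--     return tuple(1 if m >= threshold else 0 for m in sums)
-- ===== Notes on version B (the rewrite author's own statement) =====
-- stated objective: alternative
-- what changed: A's linear row-major loop mutating a merged accumulator array is replaced by a recursive divide-and-conquer tree reduction: the row list is split in half, each half's column-sum vector is computed recursively, and the halves are combined by pointwise vector addition before thresholding; correct because integer addition is associative, so the tree association yields the same column sums.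
import Mathlib
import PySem

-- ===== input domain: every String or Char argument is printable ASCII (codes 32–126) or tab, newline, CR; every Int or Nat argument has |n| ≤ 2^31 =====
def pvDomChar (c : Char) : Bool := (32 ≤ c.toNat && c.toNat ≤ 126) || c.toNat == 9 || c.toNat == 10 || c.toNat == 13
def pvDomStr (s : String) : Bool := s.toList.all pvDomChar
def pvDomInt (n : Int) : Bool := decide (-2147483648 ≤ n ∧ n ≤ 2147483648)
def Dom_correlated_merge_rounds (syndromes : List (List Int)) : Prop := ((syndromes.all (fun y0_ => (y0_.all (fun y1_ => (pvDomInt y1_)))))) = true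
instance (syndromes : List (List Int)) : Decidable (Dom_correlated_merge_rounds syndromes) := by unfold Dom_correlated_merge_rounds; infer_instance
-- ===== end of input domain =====

-- B replaces A's linear row-major accumulator loop by a recursive divide-and-conquer tree reduction over the rows (return value only).
set_option maxRecDepth 4000


-- ===== PORT A =====
-- literal port of A: merged = [0]*n; row-major loop adding s[i] into merged[i]; then threshold each slot
def correlated_merge_rounds (syndromes : List (List Int)) : List Int :=
  match syndromes with
  | [] => []
  | s0 :: _ =>
    let n := s0.length
    let merged : List Int :=
      syndromes.foldl
        (fun merged s =>
          (List.range n).foldl (fun m i => m.set i (m.getD i 0 + s.getD i 0)) merged)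
        (List.replicate n 0)
    let threshold : Int := (syndromes.length : Int) / 2 + 1
    merged.map (fun m => if m ≥ threshold then (1 : Int) else 0)

-- ===== PORT B =====
-- divide-and-conquer column sums of rows lo..hi-1 (the 'hi - lo ≤ 1' guard makes the recursion total; B's
-- Python writes the same guard)
def pvColsums (syndromes : List (List Int)) (n lo hi : Nat) : List Int :=
  if hi - lo ≤ 1 then
    (List.range n).map (fun i => (syndromes.getD lo []).getD i 0)
  else
    let mid := (lo + hi) / 2
    List.zipWith (· + ·) (pvColsums syndromes n lo mid) (pvColsums syndromes n mid hi)
termination_by hi - lo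
decreasing_by all_goals omega

def correlated_merge_rounds_alt (syndromes : List (List Int)) : List Int :=
  match syndromes with
  | [] => []
  | s0 :: _ =>
    let n := s0.length
    let sums := pvColsums syndromes n 0 syndromes.length
    let threshold : Int := (syndromes.length : Int) / 2 + 1
    sums.map (fun m => if m ≥ threshold then (1 : Int) else 0)

-- ===== PRECONDITION & SPEC =====
-- Pre_ excludes exactly the ragged inputs on which A raises IndexError (some row shorter than the first row).
def Pre_correlated_merge_rounds (syndromes : List (List Int)) : Prop :=
  ∀ s ∈ syndromes, (syndromes.headD []).length ≤ s.length
instance (syndromes : List (List Int)) : Decidable (Pre_correlated_merge_rounds syndromes) := by unfold Pre_correlated_merge_rounds; infer_instance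
def pvWitness_correlated_merge_rounds : List (List Int) := [[1, 0], [0, 0], [1, 1]]

def Spec_correlated_merge_rounds (syndromes : List (List Int)) (out : List Int) : Prop := out = correlated_merge_rounds_alt syndromes
instance (syndromes : List (List Int)) (out : List Int) : Decidable (Spec_correlated_merge_rounds syndromes out) := by unfold Spec_correlated_merge_rounds; infer_instance

-- ===== CLAIM (what is proved, stated in full; the proofs are below) =====
def Claim_equal_correlated_merge_rounds : Prop := ∀ (syndromes : List (List Int)), Dom_correlated_merge_rounds syndromes → Pre_correlated_merge_rounds syndromes → Spec_correlated_merge_rounds syndromes (correlated_merge_rounds syndromes)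

-- ===== LEMMAS AND PROOFS =====

theorem getD_map_range (f : Nat → Int) (n i : Nat) (hi : i < n) :
    ((List.range n).map f).getD i 0 = f i := by
  rw [List.getD_eq_getElem _ _ (by simpa using hi)]
  simp

-- A's inner loop: the first n slots of m get s added pointwise, the rest is kept
theorem innerFold_eq (s m : List Int) (n : Nat) (hk : n ≤ m.length) :
    (List.range n).foldl (fun m i => m.set i (m.getD i 0 + s.getD i 0)) m
      = (List.range n).map (fun i => m.getD i 0 + s.getD i 0) ++ m.drop n := by
  induction n with
  | zero => simp
  | succ n ih =>
    rw [List.range_succ, List.foldl_append, ih (by omega)]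
    have hlt : n < m.length := by omega
    have hgetD : ((List.range n).map (fun i => m.getD i 0 + s.getD i 0) ++ m.drop n).getD n 0
        = m.getD n 0 := by
      simp [List.getD, List.getElem?_append_right, List.getElem?_drop]
    have hdrop : m.drop n = m[n] :: m.drop (n + 1) := List.drop_eq_getElem_cons hlt
    simp only [List.foldl_cons, List.foldl_nil, hgetD]
    rw [List.set_append_right _ _ (by simp)]
    simp only [List.length_map, List.length_range, Nat.sub_self, hdrop, List.set_cons_zero,
      List.map_append, List.map_cons, List.map_nil, List.append_assoc, List.cons_append,
      List.nil_append]

-- A's outer loop: merged ends up as initial value plus the per-column sums over all rows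
theorem outerFold_eq (rows : List (List Int)) (n : Nat) (m : List Int) (hm : m.length = n) :
    rows.foldl
      (fun merged s => (List.range n).foldl (fun m i => m.set i (m.getD i 0 + s.getD i 0)) merged)
      m
      = (List.range n).map (fun i => m.getD i 0 + (rows.map (fun s => s.getD i 0)).sum) := by
  induction rows generalizing m with
  | nil =>
    simp only [List.foldl_nil, List.map_nil, List.sum_nil, add_zero]
    apply List.ext_getElem (by simp [hm])
    intro i h1 h2
    rw [List.getElem_map, List.getElem_range]
    rw [List.getD_eq_getElem _ _ (by simp [hm] at h2 ⊢; omega)]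
  | cons s rs ih =>
    simp only [List.foldl_cons]
    rw [innerFold_eq s m n (by omega)]
    have hdrop : m.drop n = [] := by rw [List.drop_eq_nil_iff]; omega
    rw [hdrop, List.append_nil, ih _ (by simp)]
    apply List.map_congr_left
    intro i hi
    rw [List.mem_range] at hi
    rw [getD_map_range _ _ _ hi]
    simp only [List.map_cons, List.sum_cons]
    ring

-- a list map-sum as an index sum, to meet B's Ico characterisation
theorem mapSum_eq_rangeSum (rows : List (List Int)) (f : List Int → Int) :
    (rows.map f).sum = ∑ j ∈ Finset.range rows.length, f (rows.getD j []) := by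
  induction rows with
  | nil => simp
  | cons r rs ih =>
    simp only [List.map_cons, List.sum_cons, List.length_cons]
    rw [Finset.sum_range_succ', ih]
    simp [List.getD, add_comm]

theorem zipWith_add_map_range (n : Nat) (g h : Nat → Int) :
    List.zipWith (· + ·) ((List.range n).map g) ((List.range n).map h)
      = (List.range n).map (fun i => g i + h i) := by
  induction n with
  | zero => simp
  | succ n ih => simp [List.range_succ, List.zipWith_append, ih]

-- B's recursion computes the column sums of rows lo..hi-1
theorem pvColsums_eq (syndromes : List (List Int)) (n : Nat) :
    ∀ (k lo hi : Nat), hi - lo = k → lo < hi →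
      pvColsums syndromes n lo hi
        = (List.range n).map (fun i => ∑ j ∈ Finset.Ico lo hi, (syndromes.getD j []).getD i 0) := by
  intro k
  induction k using Nat.strong_induction_on with
  | _ k ih =>
    intro lo hi hk hlt
    rw [pvColsums]
    by_cases hbase : hi - lo ≤ 1
    · have hhi : hi = lo + 1 := by omega
      subst hhi
      rw [if_pos hbase]
      have hico : Finset.Ico lo (lo + 1) = {lo} := by ext x; simp
      simp [hico]
    · rw [if_neg hbase]
      show List.zipWith (· + ·) (pvColsums syndromes n lo ((lo + hi) / 2))
          (pvColsums syndromes n ((lo + hi) / 2) hi)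
        = (List.range n).map (fun i => ∑ j ∈ Finset.Ico lo hi, (syndromes.getD j []).getD i 0)
      have h1 : lo < (lo + hi) / 2 := by omega
      have h2 : (lo + hi) / 2 < hi := by omega
      rw [ih ((lo + hi) / 2 - lo) (by omega) lo ((lo + hi) / 2) rfl h1,
          ih (hi - (lo + hi) / 2) (by omega) ((lo + hi) / 2) hi rfl h2,
          zipWith_add_map_range]
      apply List.map_congr_left
      intro i _
      exact Finset.sum_Ico_consecutive _ (by omega) (by omega)

-- ===== VERDICT (by name: the statement is the Claim_ definition above) =====
theorem correlated_merge_rounds_spec : Claim_equal_correlated_merge_rounds := by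
  intro syndromes _ _
  unfold Spec_correlated_merge_rounds
  cases syndromes with
  | nil => rfl
  | cons s0 rest =>
    unfold correlated_merge_rounds correlated_merge_rounds_alt
    simp only
    rw [outerFold_eq _ _ _ (by simp)]
    rw [pvColsums_eq (s0 :: rest) s0.length ((s0 :: rest).length - 0) 0 (s0 :: rest).length rfl
      (by simp)]
    rw [List.map_map, List.map_map]
    apply List.map_congr_left
    intro i hi
    rw [List.mem_range] at hi
    simp only [Function.comp]
    have h0 : (List.replicate s0.length (0 : Int)).getD i 0 = 0 := by
      rw [List.getD_eq_getElem _ _ (by simpa using hi)]; simp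
    have hsum := mapSum_eq_rangeSum (s0 :: rest) (fun s => s.getD i 0)
    rw [Finset.range_eq_Ico] at hsum
    simp only [h0, zero_add, hsum]
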